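-- pv_equiv track=rewrite | github.com/NischalRana29/DCP_Assignment_C24392253 | starter_code.py | parse_abc_tune
-- ===== SOURCE A (Python) =====
-- def parse_abc_tune(lines):
--     tune ={
--         "ref_number": None,
--         "title": None,
--         "tune_type": None,
--         "meter": None,
--         "key_sig": None,
--         "raw_abc": "\n".join(lines)
--     }
--
--     for line in lines:
--         if line.startswith("X:"):
--             tune["ref_number"] = line[2:].strip()
--         elif line.startswith("T:"):
--             tune["title"] = line[2:].strip()
--         elif line.startswith("R:"):
--             tune["tune_type"] = line[2:].strip()
--         elif line.startswith("M:"):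
--             tune["meter"] = line[2:].strip()
--         elif line.startswith("K:"):
--             tune["key_sig"] = line[2:].strip()
--
--     return tune
-- ===== SOURCE B (Python) =====
-- def parse_abc_tune(lines):
--     # Per-field extraction: for each header field, scan the lines from the end
--     # and take the last matching line (which is what repeated overwrites give).
--     def last_value(prefix):
--         for line in reversed(lines):
--             if line.startswith(prefix):
--                 return line[2:].strip()
--         return None
--
--     return {
--         "ref_number": last_value("X:"),
--         "title": last_value("T:"),
--         "tune_type": last_value("R:"),
--         "meter": last_value("M:"),
--         "key_sig": last_value("K:"),
--         "raw_abc": "\n".join(lines),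
--     }
-- ===== Notes on version B (the rewrite author's own statement) =====
-- stated objective: alternative
-- what changed: A loops once over the lines mutating a dict field per matching prefix (last write wins); B builds the result directly, computing each field independently as the last matching line by a reverse scan, with no mutable dict.
import Mathlib
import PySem

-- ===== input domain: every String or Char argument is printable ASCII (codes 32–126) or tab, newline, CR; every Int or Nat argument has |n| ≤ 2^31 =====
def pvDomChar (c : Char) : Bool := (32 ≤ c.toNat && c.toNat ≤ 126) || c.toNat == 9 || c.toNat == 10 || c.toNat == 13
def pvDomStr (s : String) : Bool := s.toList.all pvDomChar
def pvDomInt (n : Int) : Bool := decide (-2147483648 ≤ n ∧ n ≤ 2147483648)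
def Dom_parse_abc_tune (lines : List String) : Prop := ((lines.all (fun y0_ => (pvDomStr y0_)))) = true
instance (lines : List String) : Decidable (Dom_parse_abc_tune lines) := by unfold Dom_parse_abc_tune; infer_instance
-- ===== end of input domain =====

-- B computes each field independently (last matching line via a reverse scan) instead of A's
-- single mutating-dict pass; same O(n) cost, no mutable state (objective: alternative).

-- ===== PORT A =====
-- line[2:].strip()
def pvVal (line : String) : Option String :=
  some (PySem.Str.strip (PySem.Str.slice line (some 2) none))

-- the body of A's for-loop
def pvStep (d : PySem.Dict String (Option String)) (line : String) :
    PySem.Dict String (Option String) :=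
  if PySem.Str.startswith line "X:" then d.insert "ref_number" (pvVal line)
  else if PySem.Str.startswith line "T:" then d.insert "title" (pvVal line)
  else if PySem.Str.startswith line "R:" then d.insert "tune_type" (pvVal line)
  else if PySem.Str.startswith line "M:" then d.insert "meter" (pvVal line)
  else if PySem.Str.startswith line "K:" then d.insert "key_sig" (pvVal line)
  else d

def parse_abc_tune (lines : List String) : List (String × Option String) :=
  (lines.foldl pvStep (PySem.Dict.ofList
    [("ref_number", none), ("title", none), ("tune_type", none),
     ("meter", none), ("key_sig", none),
     ("raw_abc", some (PySem.Str.join "\n" lines))])).items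

-- ===== PORT B =====
-- last line starting with the prefix, via a reverse scan; None if absent
def pvLastValue (lines : List String) (p : String) : Option String :=
  (lines.reverse.find? (fun l => PySem.Str.startswith l p)).map
    (fun l => PySem.Str.strip (PySem.Str.slice l (some 2) none))

def parse_abc_tune_alt (lines : List String) : List (String × Option String) :=
  [("ref_number", pvLastValue lines "X:"),
   ("title", pvLastValue lines "T:"),
   ("tune_type", pvLastValue lines "R:"),
   ("meter", pvLastValue lines "M:"),
   ("key_sig", pvLastValue lines "K:"),
   ("raw_abc", some (PySem.Str.join "\n" lines))]

-- ===== PRECONDITION & SPEC =====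
def Spec_parse_abc_tune (lines : List String) (out : List (String × Option String)) : Prop := out = parse_abc_tune_alt lines
instance (lines : List String) (out : List (String × Option String)) : Decidable (Spec_parse_abc_tune lines out) := by unfold Spec_parse_abc_tune; infer_instance

-- ===== CLAIM (what is proved, stated in full; the proofs are below) =====
def Claim_equal_parse_abc_tune : Prop := ∀ (lines : List String), Dom_parse_abc_tune lines → Spec_parse_abc_tune lines (parse_abc_tune lines)

-- ===== LEMMAS AND PROOFS =====

-- forward accumulator form of "value of the last matching line, default v"
def pvUpd (p : String) : List String → Option String → Option String
  | [], v => v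
  | l :: t, v => pvUpd p t (if PySem.Str.startswith l p then pvVal l else v)

theorem pvUpd_eq_find (p : String) (ls : List String) (v : Option String) :
    pvUpd p ls v =
      match ls.reverse.find? (fun l => PySem.Str.startswith l p) with
      | some l => pvVal l
      | none => v := by
  induction ls generalizing v with
  | nil => simp [pvUpd]
  | cons h t ih =>
    simp only [pvUpd, List.reverse_cons, List.find?_append, ih]
    cases hf : t.reverse.find? (fun l => PySem.Str.startswith l p) <;>
      simp [List.find?, Option.or] <;> split <;> simp_all

theorem pvSw_head {l : List Char} {c : Char}
    (hc : PySem.Chars.startswith l [c, ':'] = true) : l.head? = some c := by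
  rw [PySem.Chars.startswith_iff] at hc
  obtain ⟨t, rfl⟩ := hc
  rfl

theorem pvSw_ne {l : List Char} {c d : Char} (hc : l.head? = some c) (hne : d ≠ c) :
    PySem.Chars.startswith l [d, ':'] = false := by
  cases hsw : PySem.Chars.startswith l [d, ':'] with
  | false => rfl
  | true =>
    have h2 := pvSw_head hsw
    rw [hc] at h2
    injection h2 with h3
    exact absurd h3.symm hne

theorem pvStep_mk (h : String) (v1 v2 v3 v4 v5 vr : Option String) :
    pvStep (PySem.Dict.mk
      [("ref_number", v1), ("title", v2), ("tune_type", v3),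
       ("meter", v4), ("key_sig", v5), ("raw_abc", vr)]) h =
    PySem.Dict.mk
      [("ref_number", if PySem.Str.startswith h "X:" then pvVal h else v1),
       ("title", if PySem.Str.startswith h "T:" then pvVal h else v2),
       ("tune_type", if PySem.Str.startswith h "R:" then pvVal h else v3),
       ("meter", if PySem.Str.startswith h "M:" then pvVal h else v4),
       ("key_sig", if PySem.Str.startswith h "K:" then pvVal h else v5),
       ("raw_abc", vr)] := by
  by_cases hX : PySem.Str.startswith h "X:" = true
  · have hh : h.toList.head? = some 'X' := pvSw_head (by simpa using hX)
    have hT : PySem.Str.startswith h "T:" = false := by simpa using pvSw_ne hh (by decide)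
    have hR : PySem.Str.startswith h "R:" = false := by simpa using pvSw_ne hh (by decide)
    have hM : PySem.Str.startswith h "M:" = false := by simpa using pvSw_ne hh (by decide)
    have hK : PySem.Str.startswith h "K:" = false := by simpa using pvSw_ne hh (by decide)
    simp at hX hT hR hM hK
    simp [pvStep, PySem.Dict.insert, PySem.Dict.contains, hX, hT, hR, hM, hK]
  · by_cases hT : PySem.Str.startswith h "T:" = true
    · have hh : h.toList.head? = some 'T' := pvSw_head (by simpa using hT)
      have hR : PySem.Str.startswith h "R:" = false := by simpa using pvSw_ne hh (by decide)
      have hM : PySem.Str.startswith h "M:" = false := by simpa using pvSw_ne hh (by decide)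
      have hK : PySem.Str.startswith h "K:" = false := by simpa using pvSw_ne hh (by decide)
      simp at hX hT hR hM hK
      simp [pvStep, PySem.Dict.insert, PySem.Dict.contains, hX, hT, hR, hM, hK]
    · by_cases hR : PySem.Str.startswith h "R:" = true
      · have hh : h.toList.head? = some 'R' := pvSw_head (by simpa using hR)
        have hM : PySem.Str.startswith h "M:" = false := by simpa using pvSw_ne hh (by decide)
        have hK : PySem.Str.startswith h "K:" = false := by simpa using pvSw_ne hh (by decide)
        simp at hX hT hR hM hK
        simp [pvStep, PySem.Dict.insert, PySem.Dict.contains, hX, hT, hR, hM, hK]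
      · by_cases hM : PySem.Str.startswith h "M:" = true
        · have hh : h.toList.head? = some 'M' := pvSw_head (by simpa using hM)
          have hK : PySem.Str.startswith h "K:" = false := by simpa using pvSw_ne hh (by decide)
          simp at hX hT hR hM hK
          simp [pvStep, PySem.Dict.insert, PySem.Dict.contains, hX, hT, hR, hM, hK]
        · by_cases hK : PySem.Str.startswith h "K:" = true
          · simp at hX hT hR hM hK
            simp [pvStep, PySem.Dict.insert, PySem.Dict.contains, hX, hT, hR, hM, hK]
          · simp at hX hT hR hM hK
            simp [pvStep, hX, hT, hR, hM, hK]

theorem pvFold_items (ls : List String) (v1 v2 v3 v4 v5 vr : Option String) :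
    (ls.foldl pvStep (PySem.Dict.mk
      [("ref_number", v1), ("title", v2), ("tune_type", v3),
       ("meter", v4), ("key_sig", v5), ("raw_abc", vr)])).items =
    [("ref_number", pvUpd "X:" ls v1), ("title", pvUpd "T:" ls v2),
     ("tune_type", pvUpd "R:" ls v3), ("meter", pvUpd "M:" ls v4),
     ("key_sig", pvUpd "K:" ls v5), ("raw_abc", vr)] := by
  induction ls generalizing v1 v2 v3 v4 v5 with
  | nil => simp [pvUpd]
  | cons h t ih =>
    rw [List.foldl_cons, pvStep_mk, ih]
    rfl

theorem pvLastValue_eq (lines : List String) (p : String) :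
    pvLastValue lines p = pvUpd p lines none := by
  rw [pvUpd_eq_find, pvLastValue]
  cases lines.reverse.find? (fun l => PySem.Str.startswith l p) <;> simp [pvVal]

theorem pvOfList_mk (vr : Option String) :
    PySem.Dict.ofList
      [("ref_number", (none : Option String)), ("title", none), ("tune_type", none),
       ("meter", none), ("key_sig", none), ("raw_abc", vr)] =
    PySem.Dict.mk
      [("ref_number", none), ("title", none), ("tune_type", none),
       ("meter", none), ("key_sig", none), ("raw_abc", vr)] := by
  simp [PySem.Dict.ofList, PySem.Dict.update, PySem.Dict.insert, PySem.Dict.contains,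
        PySem.Dict.empty, List.foldl]

-- ===== VERDICT (by name: the statement is the Claim_ definition above) =====
theorem parse_abc_tune_spec : Claim_equal_parse_abc_tune := by
  intro lines _
  show parse_abc_tune lines = parse_abc_tune_alt lines
  rw [parse_abc_tune, pvOfList_mk, pvFold_items]
  simp [parse_abc_tune_alt, pvLastValue_eq]
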